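-- pv_equiv track=rewrite | github.com/mattmillen15/Warden | portal/app.py | _looks_like_challenge
-- ===== SOURCE A (Python) =====
-- CHALLENGE_MARKERS = ("captcha", "turnstile", "cloudflare", "human verification", "just a moment")
--
-- def _looks_like_challenge(text):
--     lower = (text or "").lower()
--     challenge_hints = (
--         "access is denied due to automated program detection",
--         "please verify captcha",
--         "captcha validation error",
--         "failed recaptcha",
--         "blocked automated program",
--     )
--     return any(marker in lower for marker in CHALLENGE_MARKERS + challenge_hints)
-- ===== SOURCE B (Python) =====
-- CHALLENGE_MARKERS = ("captcha", "turnstile", "cloudflare", "human verification", "just a moment")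
--
-- _CHALLENGE_HINTS = (
--     "access is denied due to automated program detection",
--     "please verify captcha",
--     "captcha validation error",
--     "failed recaptcha",
--     "blocked automated program",
-- )
--
-- # first-character index: maps a character to the markers that start with it,
-- # built once at module load; the per-position inner scan over all markers
-- # disappears for every position whose character starts no marker.
-- _INDEX = {}
-- for _m in CHALLENGE_MARKERS + _CHALLENGE_HINTS:
--     _INDEX.setdefault(_m[0], []).append(_m)
--
--
-- def _looks_like_challenge(text):
--     lower = (text or "").lower()
--     for i, ch in enumerate(lower):
--         for m in _INDEX.get(ch, ()):
--             if lower.startswith(m, i):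
--                 return True
--     return False
-- ===== Notes on version B (the rewrite author's own statement) =====
-- stated objective: alternative
-- what changed: B replaces A's one-full-substring-search-per-marker loop with a single left-to-right scan of the lowered text driven by a first-character dict index built once from the markers: at each position only markers starting with that character are tried via offset startswith, returning early on the first hit.
import Mathlib
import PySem

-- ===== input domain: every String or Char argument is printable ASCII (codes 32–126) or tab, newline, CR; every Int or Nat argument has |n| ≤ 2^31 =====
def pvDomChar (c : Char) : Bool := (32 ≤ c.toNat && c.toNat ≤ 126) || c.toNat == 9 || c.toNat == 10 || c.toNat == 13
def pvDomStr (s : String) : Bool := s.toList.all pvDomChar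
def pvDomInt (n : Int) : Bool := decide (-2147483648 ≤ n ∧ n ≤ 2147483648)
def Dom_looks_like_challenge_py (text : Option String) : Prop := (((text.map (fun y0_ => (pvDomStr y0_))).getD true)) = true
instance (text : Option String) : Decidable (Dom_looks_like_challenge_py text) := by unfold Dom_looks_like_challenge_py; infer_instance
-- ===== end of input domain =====

-- B replaces A's per-marker substring searches by a single scan of the lowered text using a
-- first-character index (a dict built once from the markers); same worst-case cost class.


-- the module constant CHALLENGE_MARKERS
def pvChallengeMarkers : List String :=
  ["captcha", "turnstile", "cloudflare", "human verification", "just a moment"]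

-- the tuple challenge_hints (module constant _CHALLENGE_HINTS in Source B, local tuple in A)
def pvChallengeHints : List String :=
  ["access is denied due to automated program detection",
   "please verify captcha",
   "captcha validation error",
   "failed recaptcha",
   "blocked automated program"]

-- ===== PORT A =====
-- any(marker in lower for marker in CHALLENGE_MARKERS + challenge_hints)
def looks_like_challenge_py (text : Option String) : Bool :=
  let lower := PySem.Str.lower (text.getD "")
  (pvChallengeMarkers ++ pvChallengeHints).any (fun marker => PySem.Str.isIn marker lower)

-- ===== PORT B =====
-- _INDEX: for m in markers: _INDEX.setdefault(m[0], []).append(m)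
-- (every marker is nonempty, so m[0] is its head; headD is exact here)
def pvIndex : PySem.Dict Char (List String) :=
  (pvChallengeMarkers ++ pvChallengeHints).foldl
    (fun d m => d.insert (m.toList.headD ' ') (d.getD (m.toList.headD ' ') [] ++ [m]))
    PySem.Dict.empty

-- the scan loop: for i, ch in enumerate(lower): for m in _INDEX.get(ch, ()): if
-- lower.startswith(m, i): return True — lower.startswith(m, i) is exactly
-- 'm is a prefix of the suffix at i', so the loop is a recursion on suffixes
def pvScan : List Char → Bool
  | [] => false
  | c :: rest =>
    (pvIndex.getD c []).any (fun m => PySem.Chars.startswith (c :: rest) m.toList) || pvScan rest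

def looks_like_challenge_py_alt (text : Option String) : Bool :=
  pvScan (PySem.Str.lower (text.getD "")).toList

-- ===== PRECONDITION & SPEC =====
def Spec_looks_like_challenge_py (text : Option String) (out : Bool) : Prop := out = looks_like_challenge_py_alt text
instance (text : Option String) (out : Bool) : Decidable (Spec_looks_like_challenge_py text out) := by unfold Spec_looks_like_challenge_py; infer_instance

-- ===== CLAIM (what is proved, stated in full; the proofs are below) =====
def Claim_equal_looks_like_challenge_py : Prop := ∀ (text : Option String), Dom_looks_like_challenge_py text → Spec_looks_like_challenge_py text (looks_like_challenge_py text)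

-- ===== LEMMAS AND PROOFS =====

theorem pv_markers_ne_nil : ∀ m ∈ pvChallengeMarkers ++ pvChallengeHints, m.toList ≠ [] := by
  decide

-- the built index, evaluated
theorem pv_index_lit : pvIndex = PySem.Dict.mk
  [('c', ["captcha", "cloudflare", "captcha validation error"]),
   ('t', ["turnstile"]),
   ('h', ["human verification"]),
   ('j', ["just a moment"]),
   ('a', ["access is denied due to automated program detection"]),
   ('p', ["please verify captcha"]),
   ('f', ["failed recaptcha"]),
   ('b', ["blocked automated program"])] := by decide

-- the index sends a character to exactly the markers starting with it, in order
theorem pv_index_getD (c : Char) :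
    pvIndex.getD c [] =
      (pvChallengeMarkers ++ pvChallengeHints).filter (fun m => m.toList.head? == some c) := by
  by_cases h1 : c = 'c'; · subst h1; decide
  by_cases h2 : c = 't'; · subst h2; decide
  by_cases h3 : c = 'h'; · subst h3; decide
  by_cases h4 : c = 'j'; · subst h4; decide
  by_cases h5 : c = 'a'; · subst h5; decide
  by_cases h6 : c = 'p'; · subst h6; decide
  by_cases h7 : c = 'f'; · subst h7; decide
  by_cases h8 : c = 'b'; · subst h8; decide
  rw [pv_index_lit]
  simp [PySem.Dict.getD_eq_get?_getD,
    pvChallengeMarkers, pvChallengeHints,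
    Ne.symm h1, Ne.symm h2, Ne.symm h3, Ne.symm h4,
    Ne.symm h5, Ne.symm h6, Ne.symm h7, Ne.symm h8, PySem.Dict.get?]

-- at a nonempty suffix, scanning only the indexed markers equals scanning all markers
theorem pv_any_index (c : Char) (rest : List Char) :
    (pvIndex.getD c []).any (fun m => PySem.Chars.startswith (c :: rest) m.toList) =
      (pvChallengeMarkers ++ pvChallengeHints).any
        (fun m => PySem.Chars.startswith (c :: rest) m.toList) := by
  rw [pv_index_getD, List.any_filter, Bool.eq_iff_iff]
  simp only [List.any_eq_true, Bool.and_eq_true, beq_iff_eq]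
  constructor
  · rintro ⟨m, hm, _, hsw⟩; exact ⟨m, hm, hsw⟩
  · rintro ⟨m, hm, hsw⟩
    refine ⟨m, hm, ?_, hsw⟩
    have hne := pv_markers_ne_nil m hm
    rw [PySem.Chars.startswith_iff] at hsw
    cases hml : m.toList with
    | nil => exact absurd hml hne
    | cons h t =>
      rw [hml] at hsw
      rw [(List.cons_prefix_cons.mp hsw).1]
      rfl

-- the scan fires iff some marker is a prefix of some suffix
theorem pv_scan_iff (s : List Char) :
    pvScan s = true ↔
      ∃ m ∈ pvChallengeMarkers ++ pvChallengeHints, ∃ j, m.toList <+: s.drop j := by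
  induction s with
  | nil =>
    simp only [pvScan, List.drop_nil, List.prefix_nil, Bool.false_eq_true, false_iff]
    rintro ⟨m, hm, _, hml⟩
    exact pv_markers_ne_nil m hm hml
  | cons c rest ih =>
    rw [pvScan, pv_any_index, Bool.or_eq_true, ih]
    simp only [List.any_eq_true]
    constructor
    · rintro (⟨m, hm, hsw⟩ | ⟨m, hm, j, hj⟩)
      · exact ⟨m, hm, 0, by simpa using (PySem.Chars.startswith_iff _ _).mp hsw⟩
      · exact ⟨m, hm, j + 1, by simpa using hj⟩
    · rintro ⟨m, hm, j, hj⟩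
      cases j with
      | zero =>
        exact Or.inl ⟨m, hm, (PySem.Chars.startswith_iff _ _).mpr (by simpa using hj)⟩
      | succ j =>
        exact Or.inr ⟨m, hm, j, by simpa using hj⟩

-- ===== VERDICT (by name: the statement is the Claim_ definition above) =====
theorem looks_like_challenge_py_spec : Claim_equal_looks_like_challenge_py := by
  intro text _
  unfold Spec_looks_like_challenge_py looks_like_challenge_py looks_like_challenge_py_alt
  rw [Bool.eq_iff_iff, pv_scan_iff]
  simp only [List.any_eq_true]
  constructor
  · rintro ⟨m, hm, hin⟩
    rw [PySem.Str.isIn_eq, ← PySem.Chars.exists_prefix_drop_iff_isIn] at hin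
    exact ⟨m, hm, hin⟩
  · rintro ⟨m, hm, hj⟩
    refine ⟨m, hm, ?_⟩
    rw [PySem.Str.isIn_eq, ← PySem.Chars.exists_prefix_drop_iff_isIn]
    exact hj
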